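-- pv_equiv track=rewrite | github.com/Alexander-Ageev/Exercises | 28 exercises/13 (UFO)/main.py | UFO
-- ===== SOURCE A (Python) =====
-- def octacode(number):
--     result = 0
--     octo = str(number)[::-1]
--     for i in range(len(octo)):
--         result += int(octo[i]) * 8**i
--     return result
--
-- def hexacode(number):
--     result = 0
--     hexo = str(number)[::-1]
--     for i in range(len(hexo)):
--         result += int(hexo[i]) * 16**i
--     return result
--
-- def UFO(N, data, octal):
--     result = []
--     for i in range(N):
--         if octal:
--             result.append(octacode(data[i]))
--         else:
--             result.append(hexacode(data[i]))
--     return result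
-- ===== SOURCE B (Python) =====
-- def convert(number, base):
--     result = 0
--     for ch in str(number):
--         result = result * base + int(ch)
--     return result
--
-- def UFO(N, data, octal):
--     base = 8 if octal else 16
--     return [convert(data[i], base) for i in range(N)]
-- ===== Notes on version B (the rewrite author's own statement) =====
-- stated objective: simpler
-- what changed: Replaces the two reverse-and-power-sum helpers (string reversal plus base**i exponentiation per digit) with one Horner-style helper that scans the digit string left-to-right keeping a single multiply-accumulate register, called with base 8 or 16 from a comprehension.
import Mathlib
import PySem

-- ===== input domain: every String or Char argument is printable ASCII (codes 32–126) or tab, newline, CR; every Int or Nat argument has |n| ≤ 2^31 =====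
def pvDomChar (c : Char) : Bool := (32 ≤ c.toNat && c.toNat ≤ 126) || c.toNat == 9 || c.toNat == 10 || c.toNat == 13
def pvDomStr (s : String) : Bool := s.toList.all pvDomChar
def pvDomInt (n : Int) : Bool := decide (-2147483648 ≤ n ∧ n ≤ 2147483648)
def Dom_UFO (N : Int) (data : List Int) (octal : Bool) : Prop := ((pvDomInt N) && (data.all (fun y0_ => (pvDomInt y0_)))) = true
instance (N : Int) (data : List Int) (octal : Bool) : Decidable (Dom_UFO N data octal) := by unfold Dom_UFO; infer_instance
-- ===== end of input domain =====

-- ===== PORT A =====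
-- B replaces the reverse-and-power-sum helpers by a single left-to-right Horner accumulator (simpler; same values).
-- int(ch) for a single character ch, as both Pythons call it (none = ValueError; Pre_ excludes those inputs)
def pyIntOfChar (c : Char) : Int := (PySem.Int.ofChars? [c]).getD 0

def octacode (number : Int) : Int :=
  let octo := (PySem.List.slice? (PySem.Int.toChars number) none none (-1)).getD []   -- str(number)[::-1]
  (PySem.List.pyRange 0 (octo.length : Int) 1).foldl
    (fun result i => result + pyIntOfChar (PySem.List.pyGetD octo i ' ') * 8 ^ i.toNat) 0

def hexacode (number : Int) : Int :=
  let hexo := (PySem.List.slice? (PySem.Int.toChars number) none none (-1)).getD []   -- str(number)[::-1]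
  (PySem.List.pyRange 0 (hexo.length : Int) 1).foldl
    (fun result i => result + pyIntOfChar (PySem.List.pyGetD hexo i ' ') * 16 ^ i.toNat) 0

def UFO (N : Int) (data : List Int) (octal : Bool) : List Int :=
  (PySem.List.pyRange 0 N 1).foldl
    (fun result i =>
      if octal then result ++ [octacode (PySem.List.pyGetD data i 0)]
      else result ++ [hexacode (PySem.List.pyGetD data i 0)]) []

-- ===== PORT B =====
def convert (number : Int) (base : Int) : Int :=
  (PySem.Int.toChars number).foldl (fun result ch => result * base + pyIntOfChar ch) 0

def UFO_alt (N : Int) (data : List Int) (octal : Bool) : List Int :=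
  let base : Int := if octal then 8 else 16
  (PySem.List.pyRange 0 N 1).map (fun i => convert (PySem.List.pyGetD data i 0) base)

-- ===== PRECONDITION & SPEC =====
-- Pre_: the first N entries of data must exist and be nonnegative — otherwise Python A raises
-- (IndexError on data[i], or ValueError on int('-') from the reversed sign of a negative number).
def Pre_UFO (N : Int) (data : List Int) (octal : Bool) : Prop :=
  N ≤ (data.length : Int) ∧ ∀ x ∈ data.take N.toNat, 0 ≤ x
instance (N : Int) (data : List Int) (octal : Bool) : Decidable (Pre_UFO N data octal) := by
  unfold Pre_UFO; infer_instance
def pvWitness_UFO : Int × List Int × Bool := (2, [123, 45, 6], true)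
def Spec_UFO (N : Int) (data : List Int) (octal : Bool) (out : List Int) : Prop := out = UFO_alt N data octal
instance (N : Int) (data : List Int) (octal : Bool) (out : List Int) : Decidable (Spec_UFO N data octal out) := by unfold Spec_UFO; infer_instance

-- ===== CLAIM (what is proved, stated in full; the proofs are below) =====
def Claim_equal_UFO : Prop := ∀ (N : Int) (data : List Int) (octal : Bool), Dom_UFO N data octal → Pre_UFO N data octal → Spec_UFO N data octal (UFO N data octal)

-- ===== LEMMAS AND PROOFS =====

-- little-endian digit value: valLE [d0, d1, …] b = d0 + b*d1 + b²*d2 + …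
def valLE (cs : List Char) (b : Int) : Int :=
  match cs with
  | [] => 0
  | c :: cs => pyIntOfChar c + b * valLE cs b

theorem valLE_append_singleton (cs : List Char) (c : Char) (b : Int) :
    valLE (cs ++ [c]) b = valLE cs b + b ^ cs.length * pyIntOfChar c := by
  induction cs with
  | nil => simp [valLE]
  | cons d ds ih => simp [valLE, ih, pow_succ]; ring

theorem A_fold_eq_valLE (cs : List Char) (b : Int) (n : Nat) (hn : n ≤ cs.length) (acc : Int) :
    (PySem.List.pyRange 0 (n : Int) 1).foldl
      (fun result i => result + pyIntOfChar (PySem.List.pyGetD cs i ' ') * b ^ i.toNat) acc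
    = acc + valLE (cs.take n) b := by
  induction n generalizing acc with
  | zero => simp [PySem.List.pyRange_one_eq_nil, valLE]
  | succ m ih =>
    have hcast : ((m : Int) + 1) = ((m + 1 : Nat) : Int) := by push_cast; ring
    have hsplit : PySem.List.pyRange 0 ((m + 1 : Nat) : Int) 1
        = PySem.List.pyRange 0 (m : Int) 1 ++ [(m : Int)] := by
      rw [← hcast]; exact PySem.List.pyRange_one_succ_right (by omega)
    have hm : m < cs.length := by omega
    have htake : cs.take (m + 1) = cs.take m ++ [cs[m]] := by
      simpa using (List.take_succ (l := cs) (i := m))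
    rw [hsplit, List.foldl_append, ih (by omega)]
    simp only [List.foldl_cons, List.foldl_nil, PySem.List.pyGetD_natCast, Int.toNat_natCast]
    rw [htake, valLE_append_singleton, List.getD_eq_getElem _ _ hm]
    simp [Nat.min_eq_left (le_of_lt hm)]; ring

theorem B_fold_eq_valLE (ds : List Char) (b : Int) (acc : Int) :
    ds.foldl (fun result ch => result * b + pyIntOfChar ch) acc
    = acc * b ^ ds.length + valLE ds.reverse b := by
  induction ds generalizing acc with
  | nil => simp [valLE]
  | cons c cs ih =>
    rw [List.foldl_cons, ih]
    have : cs.reverse ++ [c] = (c :: cs).reverse := by simp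
    rw [List.reverse_cons, valLE_append_singleton]
    simp [pow_succ]; ring

theorem octacode_eq (n : Int) : octacode n = convert n 8 := by
  unfold octacode convert
  rw [PySem.List.slice?_none_none_neg_one]
  rw [B_fold_eq_valLE]
  simp only [Option.getD_some]
  rw [A_fold_eq_valLE _ 8 (PySem.Int.toChars n).reverse.length (by simp)]
  simp [List.take_of_length_le]

theorem hexacode_eq (n : Int) : hexacode n = convert n 16 := by
  unfold hexacode convert
  rw [PySem.List.slice?_none_none_neg_one]
  rw [B_fold_eq_valLE]
  simp only [Option.getD_some]
  rw [A_fold_eq_valLE _ 16 (PySem.Int.toChars n).reverse.length (by simp)]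
  simp [List.take_of_length_le]

-- ===== VERDICT (by name: the statement is the Claim_ definition above) =====
theorem UFO_spec : Claim_equal_UFO := by
  intro N data octal _ _
  unfold Spec_UFO UFO UFO_alt
  cases octal with
  | false =>
    have hb : (fun (result : List Int) (i : Int) =>
        if (false : Bool) then result ++ [octacode (PySem.List.pyGetD data i 0)]
        else result ++ [hexacode (PySem.List.pyGetD data i 0)])
      = fun result i => result ++ [hexacode (PySem.List.pyGetD data i 0)] := by
      funext r i; simp
    rw [hb, PySem.List.foldl_append_singleton_eq_map]
    simp [hexacode_eq]
  | true =>
    have hb : (fun (result : List Int) (i : Int) =>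
        if (true : Bool) then result ++ [octacode (PySem.List.pyGetD data i 0)]
        else result ++ [hexacode (PySem.List.pyGetD data i 0)])
      = fun result i => result ++ [octacode (PySem.List.pyGetD data i 0)] := by
      funext r i; simp
    rw [hb, PySem.List.foldl_append_singleton_eq_map]
    simp [octacode_eq]
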